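-- pv_equiv track=rewrite | github.com/MrRush76/Advent-of-Code-2024 | Day 7/Day7.py | evaluate
-- ===== SOURCE A (Python) =====
-- def evaluate(numbers, current=None, expression="", results=None):
--   if results is None:
--     results = []
--
--   if not numbers:
--     results.append(current)
--     return results
--
--   next_num = numbers[0]
--   remaining_numbers = numbers[1:]
--
--   results = evaluate(remaining_numbers, current + next_num, f"{expression} + {next_num}", results)
--   results = evaluate(remaining_numbers, current * next_num, f"{expression} * {next_num}", results)
--   # uncomment the following lines for part 2
--   # concatenated_num = int(f"{current}{next_num}")
--   # results = evaluate(remaining_numbers, concatenated_num, f"{expression} concatenated with {next_num}", results)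
--
--   return results
-- ===== SOURCE B (Python) =====
-- def evaluate(numbers, current=None, expression="", results=None):
--     if results is None:
--         results = []
--     frontier = [current]
--     for num in numbers:
--         frontier = [r for v in frontier for r in (v + num, v * num)]
--     results.extend(frontier)
--     return results
-- ===== Notes on version B (the rewrite author's own statement) =====
-- stated objective: alternative
-- what changed: Replaced the recursive DFS (threading an accumulator list through two recursive calls per number) with an iterative breadth-first frontier: one pass over numbers rebuilding a list of all partial values, appended to results at the end.
-- outside the precondition, e.g. on evaluate([], None, '', None): A returns [None], B returns [None]
import Mathlib
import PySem

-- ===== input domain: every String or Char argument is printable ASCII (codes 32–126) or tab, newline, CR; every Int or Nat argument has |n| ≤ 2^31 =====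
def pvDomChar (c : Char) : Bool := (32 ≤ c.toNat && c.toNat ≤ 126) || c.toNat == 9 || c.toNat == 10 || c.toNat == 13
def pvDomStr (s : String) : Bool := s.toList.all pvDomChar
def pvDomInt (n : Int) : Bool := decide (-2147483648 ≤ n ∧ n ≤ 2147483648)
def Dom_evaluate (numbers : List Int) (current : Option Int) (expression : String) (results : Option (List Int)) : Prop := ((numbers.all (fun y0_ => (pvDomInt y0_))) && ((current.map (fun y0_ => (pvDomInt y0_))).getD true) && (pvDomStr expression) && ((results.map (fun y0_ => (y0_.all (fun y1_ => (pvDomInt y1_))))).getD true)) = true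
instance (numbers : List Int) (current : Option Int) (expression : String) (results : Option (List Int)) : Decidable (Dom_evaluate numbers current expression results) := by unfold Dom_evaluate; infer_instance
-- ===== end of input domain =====

-- B rebuilds the set of values with an iterative frontier instead of A's recursive DFS; return values agree on all Int currents.
-- Equivalence is about the RETURN value; both Pythons mutate/return the passed-in results list the same way.

-- ===== PORT A =====
-- recursive core of A: numbers, accumulated current, the results list so far
def evaluateRec (numbers : List Int) (current : Int) (results : List Int) : List Int :=
  match numbers with
  | [] => results ++ [current]
  | next_num :: remaining_numbers =>
    let r1 := evaluateRec remaining_numbers (current + next_num) results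
    evaluateRec remaining_numbers (current * next_num) r1

def evaluate (numbers : List Int) (current : Option Int) (expression : String) (results : Option (List Int)) : List Int :=
  let res := results.getD []
  match current with
  | some c => evaluateRec numbers c res
  | none => res  -- with current = None the Python raises TypeError (numbers ≠ []) or appends None (not an Int); excluded by Pre_

-- ===== PORT B =====
def evaluate_alt (numbers : List Int) (current : Option Int) (expression : String) (results : Option (List Int)) : List Int :=
  let res := results.getD []
  match current with
  | some c =>
    let frontier := numbers.foldl (fun fr num => fr.flatMap (fun v => [v + num, v * num])) [c]
    res ++ frontier
  | none => res  -- excluded by Pre_ (Python B raises or appends None there too)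

-- ===== PRECONDITION & SPEC =====
-- Pre_ excludes current = None: there A raises TypeError when numbers is nonempty, and with numbers = [] it
-- returns a list containing None, which is not a value of the declared List Int type.
def Pre_evaluate (numbers : List Int) (current : Option Int) (expression : String) (results : Option (List Int)) : Prop := current.isSome = true
instance (numbers : List Int) (current : Option Int) (expression : String) (results : Option (List Int)) : Decidable (Pre_evaluate numbers current expression results) := by unfold Pre_evaluate; infer_instance
def pvWitness_evaluate : List Int × Option Int × String × Option (List Int) := ([2, 3], some 1, "", some [7])

def Spec_evaluate (numbers : List Int) (current : Option Int) (expression : String) (results : Option (List Int)) (out : List Int) : Prop := out = evaluate_alt numbers current expression results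
instance (numbers : List Int) (current : Option Int) (expression : String) (results : Option (List Int)) (out : List Int) : Decidable (Spec_evaluate numbers current expression results out) := by unfold Spec_evaluate; infer_instance

-- ===== CLAIM (what is proved, stated in full; the proofs are below) =====
def Claim_equal_evaluate : Prop := ∀ (numbers : List Int) (current : Option Int) (expression : String) (results : Option (List Int)), Dom_evaluate numbers current expression results → Pre_evaluate numbers current expression results → Spec_evaluate numbers current expression results (evaluate numbers current expression results)

-- ===== LEMMAS AND PROOFS =====
-- the frontier step distributes over append
theorem frontier_append (numbers : List Int) (a b : List Int) :
    numbers.foldl (fun fr num => fr.flatMap (fun v => [v + num, v * num])) (a ++ b)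
      = numbers.foldl (fun fr num => fr.flatMap (fun v => [v + num, v * num])) a
        ++ numbers.foldl (fun fr num => fr.flatMap (fun v => [v + num, v * num])) b := by
  induction numbers generalizing a b with
  | nil => rfl
  | cons n rest ih => simp only [List.foldl_cons, List.flatMap_append, ih]

-- A's recursion computes results ++ frontier
theorem evaluateRec_eq (numbers : List Int) (c : Int) (results : List Int) :
    evaluateRec numbers c results
      = results ++ numbers.foldl (fun fr num => fr.flatMap (fun v => [v + num, v * num])) [c] := by
  induction numbers generalizing c results with
  | nil => rfl
  | cons n rest ih =>
    simp only [evaluateRec, ih, List.foldl_cons]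
    have : ([c].flatMap (fun v => [v + n, v * n])) = [c + n] ++ [c * n] := by simp
    rw [this, frontier_append, List.append_assoc]

-- ===== VERDICT (by name: the statement is the Claim_ definition above) =====
theorem evaluate_spec : Claim_equal_evaluate := by
  intro numbers current expression results _ hpre
  match current with
  | some c =>
    simp only [Spec_evaluate, evaluate, evaluate_alt, evaluateRec_eq]
  | none => exact absurd hpre (by simp [Pre_evaluate])
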